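-- pv_equiv track=rewrite | github.com/fnever520/leetcode | moneylion.py | process_logs_2
-- ===== SOURCE A (Python) =====
-- from collections import defaultdict
--
-- def process_logs_2(logs):
--     # Create a defaultdict to store the login counts for each user and date
--     login_counts = defaultdict(int)
--
--     # Loop through the logs and update the login counts dictionary
--     for log in logs:
--         # Check if the log has valid data
--         if len(log) != 3 or not log[0].startswith("user"):
--             continue
--
--         # Extract the user ID and login date from the log
--         user_id = log[0]
--         login_date = log[2]
--
--         # Update the login counts for the user and date
--         key = (user_id, login_date)
--         login_counts[key] += 1
--
--     # Convert the login counts dictionary to a list of sorted strings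
--     result = []
--     for key, value in sorted(login_counts.items()):
--         user_id, login_date = key
--         result.append([user_id, login_date, str(value)])
--
--     return result
-- ===== SOURCE B (Python) =====
-- def process_logs_2(logs):
--     # sort the valid (user, date) pairs, then emit each run's length in one pass
--     valid = sorted((log[0], log[2]) for log in logs
--                    if len(log) == 3 and log[0].startswith("user"))
--     result = []
--     i = 0
--     while i < len(valid):
--         j = i + 1
--         while j < len(valid) and valid[j] == valid[i]:
--             j += 1
--         result.append([valid[i][0], valid[i][1], str(j - i)])
--         i = j
--     return result
-- ===== Notes on version B (the rewrite author's own statement) =====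
-- stated objective: alternative
-- what changed: B never builds a counting dict: it sorts the valid (user, date) pairs (duplicates included) and does a single run-length scan over the sorted list, emitting each group and its length when the run ends.
import Mathlib
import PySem

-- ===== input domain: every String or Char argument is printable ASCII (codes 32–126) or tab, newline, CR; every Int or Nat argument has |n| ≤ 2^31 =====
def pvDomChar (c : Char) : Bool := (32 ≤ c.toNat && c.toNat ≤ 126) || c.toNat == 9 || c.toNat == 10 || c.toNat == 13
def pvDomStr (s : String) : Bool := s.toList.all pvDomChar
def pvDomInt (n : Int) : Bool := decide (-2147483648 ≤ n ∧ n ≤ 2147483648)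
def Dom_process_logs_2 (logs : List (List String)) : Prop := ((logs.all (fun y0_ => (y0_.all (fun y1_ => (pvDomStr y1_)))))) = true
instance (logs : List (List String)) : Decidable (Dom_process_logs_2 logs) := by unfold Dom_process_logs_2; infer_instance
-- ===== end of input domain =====

-- B replaces A's defaultdict counting pass by sorting the valid (user, date) pairs and
-- run-length scanning the sorted list in one pass; objective: alternative (not faster).

-- ===== PORT A =====
def process_logs_2 (logs : List (List String)) : List (List String) :=
  let login_counts : PySem.Dict (String × String) Int :=
    logs.foldl (fun d log =>
      if log.length ≠ 3 ∨ PySem.Str.startswith (PySem.List.pyGetD log 0 "") "user" = false then d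
      else
        let user_id := PySem.List.pyGetD log 0 ""
        let login_date := PySem.List.pyGetD log 2 ""
        -- defaultdict(int): login_counts[key] += 1
        d.modify (user_id, login_date) 0 (· + 1)) PySem.Dict.empty
  -- sorted(login_counts.items()): dict keys are unique, so Python's tuple comparison never
  -- reaches the count; sorting by the (user, date) key alone is exact
  (PySem.List.sorted2 login_counts.items (fun p => p.1.1) (fun p => p.1.2)).foldl
    (fun result p => result ++ [[p.1.1, p.1.2, PySem.Int.toStr p.2]]) []

-- ===== PORT B =====
-- the inner while loop scans the current run (takeWhile); the outer loop resumes at its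
-- end (dropWhile) and appends [user, date, str(run length)]
def pvRuns : List (String × String) → List (List String)
  | [] => []
  | a :: t =>
    [a.1, a.2, PySem.Int.toStr ((1 + (t.takeWhile (fun x => x == a)).length : Nat) : Int)] ::
      pvRuns (t.dropWhile (fun x => x == a))
  termination_by s => s.length
  decreasing_by simpa using Nat.lt_succ_of_le (t.length_dropWhile_le _)

def process_logs_2_alt (logs : List (List String)) : List (List String) :=
  let valid : List (String × String) :=
    PySem.List.sorted
      ((logs.filter (fun log =>
          log.length == 3 && PySem.Str.startswith (PySem.List.pyGetD log 0 "") "user")).map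
        (fun log => (PySem.List.pyGetD log 0 "", PySem.List.pyGetD log 2 "")))
      (fun k => toLex k)   -- Python's tuple order
  pvRuns valid

-- ===== PRECONDITION & SPEC =====
def Spec_process_logs_2 (logs : List (List String)) (out : List (List String)) : Prop := out = process_logs_2_alt logs
instance (logs : List (List String)) (out : List (List String)) : Decidable (Spec_process_logs_2 logs out) := by unfold Spec_process_logs_2; infer_instance

-- ===== CLAIM (what is proved, stated in full; the proofs are below) =====
def Claim_equal_process_logs_2 : Prop := ∀ (logs : List (List String)), Dom_process_logs_2 logs → Spec_process_logs_2 logs (process_logs_2 logs)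

-- ===== LEMMAS AND PROOFS =====

-- A's guarded counting loop is the Counter of the (user, date) keys of the valid logs.
theorem pv_foldA_eq_counter (logs : List (List String)) (d : PySem.Dict (String × String) Int) :
    logs.foldl (fun d log =>
      if log.length ≠ 3 ∨ PySem.Str.startswith (PySem.List.pyGetD log 0 "") "user" = false then d
      else d.modify (PySem.List.pyGetD log 0 "", PySem.List.pyGetD log 2 "") 0 (· + 1)) d
    = ((logs.filter (fun log =>
        log.length == 3 && PySem.Str.startswith (PySem.List.pyGetD log 0 "") "user")).map
        (fun log => (PySem.List.pyGetD log 0 "", PySem.List.pyGetD log 2 ""))).foldl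
        (fun d k => d.modify k 0 (· + 1)) d := by
  induction logs generalizing d with
  | nil => rfl
  | cons l t ih =>
    simp only [List.foldl_cons, List.filter_cons]
    by_cases h3 : l.length = 3
    · by_cases hs : PySem.Str.startswith (PySem.List.pyGetD l 0 "") "user" = true
      · rw [if_neg (by rintro (h | h); exact h h3; rw [hs] at h; cases h)]
        rw [if_pos (by simp [h3]; simpa using hs)]
        simpa using ih _
      · rw [if_pos (Or.inr (by simpa using hs))]
        rw [if_neg (by simp [h3]; simpa using hs)]
        exact ih d
    · rw [if_pos (Or.inl h3)]
      rw [if_neg (by simp [h3])]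
      exact ih d

-- sorted2 under String keys is sorted under the lexicographic pair key (Python's tuple order).
theorem pv_sorted2_eq_sorted_lex {α : Type} (xs : List α) (k1 k2 : α → String) :
    PySem.List.sorted2 xs k1 k2 = PySem.List.sorted xs (fun a => toLex (k1 a, k2 a)) := by
  have hb : (fun a b => decide (k1 a < k1 b) || (!decide (k1 b < k1 a) && decide (k2 a < k2 b)))
      = (fun a b => decide (toLex (k1 a, k2 a) < toLex (k1 b, k2 b))) := by
    funext a b
    by_cases h1 : k1 a < k1 b
    · simp [h1, Prod.Lex.toLex_lt_toLex]
    · by_cases h2 : k1 b < k1 a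
      · simp [h1, h2, Prod.Lex.toLex_lt_toLex, ne_of_gt h2]
      · have he : k1 a = k1 b := le_antisymm (not_lt.1 h2) (not_lt.1 h1)
        simp [he, Prod.Lex.toLex_lt_toLex]
  simp only [PySem.List.sorted2, PySem.List.sorted, hb]
  rfl

-- the heads of the runs of a list (the same recursion as pvRuns, keys only)
def pvHeads : List (String × String) → List (String × String)
  | [] => []
  | a :: t => a :: pvHeads (t.dropWhile (fun x => x == a))
  termination_by s => s.length
  decreasing_by simpa using Nat.lt_succ_of_le (t.length_dropWhile_le _)

-- in a sorted run, the head does not reappear after its run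
theorem pv_head_not_mem_drop (a : String × String) (t : List (String × String))
    (hp : (a :: t).Pairwise (fun x y => toLex x ≤ toLex y)) :
    a ∉ t.dropWhile (fun x => x == a) := by
  intro hmem
  rcases hd : t.dropWhile (fun x => x == a) with _ | ⟨h, r⟩
  · simp [hd] at hmem
  · have hne : ¬ (h == a) = true := by
      have := List.head?_dropWhile_not (fun x => x == a) t
      rw [hd] at this; simpa using this
    have hsub : (t.dropWhile (fun x => x == a)).Sublist t := List.dropWhile_sublist _
    have hpt : t.Pairwise (fun x y => toLex x ≤ toLex y) := hp.of_cons
    have hpd : (h :: r).Pairwise (fun x y => toLex x ≤ toLex y) := hd ▸ hpt.sublist hsub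
    have hha : toLex a ≤ toLex h := by
      have hmt : h ∈ t := hsub.mem (by simp [hd])
      exact (List.pairwise_cons.1 hp).1 h hmt
    have hah : toLex h ≤ toLex a := by
      rw [hd] at hmem
      rcases List.mem_cons.1 hmem with he | hr
      · exact he ▸ le_refl _
      · exact (List.pairwise_cons.1 hpd).1 a hr
    exact hne (by simpa using (toLex.injective (le_antisymm hah hha)))

theorem pv_heads_mem (s : List (String × String))
    (hp : s.Pairwise (fun x y => toLex x ≤ toLex y)) :
    ∀ x, x ∈ pvHeads s ↔ x ∈ s := by
  induction s using pvHeads.induct with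
  | case1 => intro x; simp [pvHeads]
  | case2 a t ih =>
    intro x
    have hpt : t.Pairwise (fun x y => toLex x ≤ toLex y) := hp.of_cons
    have hpd : (t.dropWhile (fun x => x == a)).Pairwise (fun x y => toLex x ≤ toLex y) :=
      hpt.sublist (List.dropWhile_sublist _)
    rw [pvHeads]
    constructor
    · intro hx
      rcases List.mem_cons.1 hx with he | hm
      · simp [he]
      · exact List.mem_cons.2 (Or.inr ((List.dropWhile_sublist _).mem ((ih hpd x).1 hm)))
    · intro hx
      rcases List.mem_cons.1 hx with he | hm
      · simp [he]
      · rcases (List.mem_append.1 (by rw [List.takeWhile_append_dropWhile]; exact hm :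
            x ∈ t.takeWhile (fun x => x == a) ++ t.dropWhile (fun x => x == a))) with htk | hdr
        · have hxa := List.mem_takeWhile_imp (p := fun x => x == a) htk
          simp only [beq_iff_eq] at hxa
          simp [hxa]
        · exact List.mem_cons.2 (Or.inr ((ih hpd x).2 hdr))

theorem pv_heads_pairwise_lt (s : List (String × String))
    (hp : s.Pairwise (fun x y => toLex x ≤ toLex y)) :
    (pvHeads s).Pairwise (fun x y => toLex x < toLex y) := by
  induction s using pvHeads.induct with
  | case1 => simp [pvHeads]
  | case2 a t ih =>
    have hpt : t.Pairwise (fun x y => toLex x ≤ toLex y) := hp.of_cons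
    have hpd : (t.dropWhile (fun x => x == a)).Pairwise (fun x y => toLex x ≤ toLex y) :=
      hpt.sublist (List.dropWhile_sublist _)
    rw [pvHeads]
    refine List.pairwise_cons.2 ⟨?_, ih hpd⟩
    intro y hy
    have hyd : y ∈ t.dropWhile (fun x => x == a) := (pv_heads_mem _ hpd y).1 hy
    have hle : toLex a ≤ toLex y :=
      (List.pairwise_cons.1 hp).1 y ((List.dropWhile_sublist _).mem hyd)
    refine lt_of_le_of_ne hle (fun he => ?_)
    have hay : a = y := toLex.injective he
    rw [← hay] at hyd
    exact pv_head_not_mem_drop a t hp hyd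

-- run-length scan of a sorted list = heads mapped with their total counts
theorem pv_runs_eq_map_heads (s : List (String × String))
    (hp : s.Pairwise (fun x y => toLex x ≤ toLex y)) :
    pvRuns s = (pvHeads s).map
      (fun k => [k.1, k.2, PySem.Int.toStr ((s.count k : Nat) : Int)]) := by
  induction s using pvRuns.induct with
  | case1 => simp [pvRuns, pvHeads]
  | case2 a t ih =>
    have hpt : t.Pairwise (fun x y => toLex x ≤ toLex y) := hp.of_cons
    have hpd : (t.dropWhile (fun x => x == a)).Pairwise (fun x y => toLex x ≤ toLex y) :=
      hpt.sublist (List.dropWhile_sublist _)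
    have hsplit : t.takeWhile (fun x => x == a) ++ t.dropWhile (fun x => x == a) = t :=
      List.takeWhile_append_dropWhile
    have hnd : a ∉ t.dropWhile (fun x => x == a) := pv_head_not_mem_drop a t hp
    have hcnt_a : (a :: t).count a = 1 + (t.takeWhile (fun x => x == a)).length := by
      have h1 : (t.takeWhile (fun x => x == a)).count a
          = (t.takeWhile (fun x => x == a)).length := by
        apply List.count_eq_length.2
        intro y hy
        have hya := List.mem_takeWhile_imp (p := fun x => x == a) hy
        simp only [beq_iff_eq] at hya
        simp [hya]
      have h2 : (t.dropWhile (fun x => x == a)).count a = 0 := List.count_eq_zero.2 hnd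
      calc (a :: t).count a = t.count a + 1 := by rw [List.count_cons_self]
        _ = (t.takeWhile (fun x => x == a)).count a
            + (t.dropWhile (fun x => x == a)).count a + 1 := by
              rw [← List.count_append, hsplit]
        _ = 1 + (t.takeWhile (fun x => x == a)).length := by omega
    rw [pvRuns, pvHeads, ih hpd, List.map_cons, hcnt_a]
    congr 1
    apply List.map_congr_left
    intro k hk
    have hkd : k ∈ t.dropWhile (fun x => x == a) := (pv_heads_mem _ hpd k).1 hk
    have hka : k ≠ a := fun he => hnd (he ▸ hkd)
    have hkt : (t.takeWhile (fun x => x == a)).count k = 0 := by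
      apply List.count_eq_zero.2
      intro hmem
      have hk2 := List.mem_takeWhile_imp (p := fun x => x == a) hmem
      simp only [beq_iff_eq] at hk2
      exact hka hk2
    have ht : t.count k = (t.takeWhile (fun x => x == a)).count k
        + (t.dropWhile (fun x => x == a)).count k := by
      conv_lhs => rw [← hsplit]
      rw [List.count_append]
    have : (a :: t).count k = (t.dropWhile (fun x => x == a)).count k := by
      rw [List.count_cons_of_ne hka.symm, ht, hkt]; omega
    rw [this]

-- the sorted distinct keys are strictly increasing under toLex
theorem pv_sorted_set_pairwise_lt (keys : List (String × String)) :
    (PySem.List.sorted (PySem.Set.ofList keys) (fun k => toLex k)).Pairwise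
      (fun a b => toLex a < toLex b) := by
  have hnd : (PySem.List.sorted (PySem.Set.ofList keys) (fun k => toLex k) false).Nodup := by
    rw [List.Perm.nodup_iff (PySem.List.sorted_perm (PySem.Set.ofList keys) (fun k => toLex k) false)]
    exact PySem.Set.nodup_ofList keys
  have hle := PySem.List.sorted_pairwise (PySem.Set.ofList keys) (fun k => toLex k)
  exact (hle.and hnd).imp (fun {a b} h =>
    lt_of_le_of_ne h.1 (fun hc => h.2 (by simpa using hc)))

-- the run heads of sorted(keys) are exactly sorted(set(keys))
theorem pv_heads_sorted_eq (keys : List (String × String)) :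
    pvHeads (PySem.List.sorted keys (fun k => toLex k))
      = PySem.List.sorted (PySem.Set.ofList keys) (fun k => toLex k) := by
  set s := PySem.List.sorted keys (fun k => toLex k) with hs
  have hp : s.Pairwise (fun x y => toLex x ≤ toLex y) :=
    PySem.List.sorted_pairwise keys (fun k => toLex k)
  have hlt : (pvHeads s).Pairwise (fun x y => toLex x < toLex y) := pv_heads_pairwise_lt s hp
  have hnd1 : (pvHeads s).Nodup :=
    hlt.imp (fun {a b} h hab => by subst hab; exact absurd h (lt_irrefl _))
  have hnd2 : (PySem.List.sorted (PySem.Set.ofList keys) (fun k => toLex k)).Nodup := by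
    rw [List.Perm.nodup_iff (PySem.List.sorted_perm _ _ false)]
    exact PySem.Set.nodup_ofList keys
  have hmem : ∀ x, x ∈ pvHeads s ↔ x ∈ PySem.Set.ofList keys := by
    intro x
    rw [pv_heads_mem s hp x, PySem.List.mem_sorted, PySem.Set.mem_ofList]
  have hperm : (pvHeads s).Perm (PySem.Set.ofList keys) :=
    (List.perm_ext_iff_of_nodup hnd1 (PySem.Set.nodup_ofList keys)).2 hmem
  exact (PySem.List.sorted_eq_of_perm_of_pairwise_lt _ _ _ hperm hlt).symm

-- ===== VERDICT (by name: the statement is the Claim_ definition above) =====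
theorem process_logs_2_spec : Claim_equal_process_logs_2 := by
  intro logs _
  unfold Spec_process_logs_2 process_logs_2 process_logs_2_alt
  set keys : List (String × String) :=
    (logs.filter (fun log =>
        log.length == 3 && PySem.Str.startswith (PySem.List.pyGetD log 0 "") "user")).map
      (fun log => (PySem.List.pyGetD log 0 "", PySem.List.pyGetD log 2 "")) with hkeys
  rw [pv_foldA_eq_counter, ← hkeys, ← PySem.Dict.counter_eq_foldl]
  simp only []
  rw [PySem.Dict.items_counter, pv_sorted2_eq_sorted_lex]
  have hsort : PySem.List.sorted
      ((PySem.Set.ofList keys).map (fun k => (k, (List.count k keys : Int))))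
      (fun p => toLex (p.1.1, p.1.2))
      = (PySem.List.sorted (PySem.Set.ofList keys) (fun k => toLex k)).map
          (fun k => (k, (List.count k keys : Int))) := by
    apply PySem.List.sorted_eq_of_perm_of_pairwise_lt
    · exact (PySem.List.sorted_perm _ _ _).map _
    · rw [List.pairwise_map]
      refine (pv_sorted_set_pairwise_lt keys).imp ?_
      intro a b h
      simpa using h
  rw [hsort, PySem.List.foldl_append_singleton_eq_map, List.map_map]
  rw [← pv_heads_sorted_eq, pv_runs_eq_map_heads _ (PySem.List.sorted_pairwise keys _)]
  apply List.map_congr_left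
  intro k _
  have hc : (PySem.List.sorted keys (fun k => toLex k)).count k = keys.count k :=
    (PySem.List.sorted_perm keys (fun k => toLex k) false).count_eq k
  rw [hc]
  rfl
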